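-- pv_equiv track=rewrite | github.com/cheokfoong/Data-Structures-and-Algorithms | Radix Sort/assignment1.py | scrabble_helper
-- ===== SOURCE A (Python) =====
-- def scrabble_helper(word_list, char_set_list):
--     """
--     Determines which words can be made using a given set of letters. The input values are word_list which takes in a list
--     of strings and the char_set_list which also takes in a list of string. The output returns char_set_list which consists
--     a list of lists.
--     complexity: O(N*M) where N is the length of word_list and M is the maximum number of characters in word_list
--     """
--     col = 0
--     for word in word_list:
--         if len(word) > col:
--             col = len(word)
--
--     position = -1 #start from first column which is right aligned
--     for length in range(col):
--
--         max_item = 0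
--         # getting the largest value of string for the particular column
--         for word in word_list:
--             if len(word) > length:
--                 item = ord(word[position]) - 97
--                 if item > max_item:
--                     max_item = item
--
--         count_array = [None] * (max_item + 1)
--         for i in range(len(count_array)):
--             count_array[i] = []
--
--         for word in word_list:
--             if len(word) > length:
--                 item = ord(word[position]) - 97
--                 count_array[item].append(word)
--             else:
--                 count_array[0].append(word) #len of words that are shoter than the len of column are place in the bucket count_array[0]
--
--         index = 0
--         #rearranging word_list
--         for i in range(len(count_array)):
--             item = i
--             inner_list = count_array[i]
--             for j in inner_list:
--                 word_list[index] = j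
--                 index += 1
--
--         position -= 1 #move to next column
--
--     count_array = [None] * len(char_set_list)
--     for i in range(len(count_array)):
--         count_array[i] = []
--
--     for i in range(len(char_set_list)):
--         for j in range(len(word_list)):
--             if sorted(word_list[j]) == sorted(char_set_list[i]):
--                 count_array[i].append(word_list[j])
--
--     char_set_list = count_array
--
--     return char_set_list
-- ===== SOURCE B (Python) =====
-- def scrabble_helper(word_list, char_set_list):
--     # Index words by sorted-letter signature (one pass over the lexicographically
--     # sorted words), then answer each char_set by a single dict lookup.
--     # Note: A sorts word_list in place; B does not mutate its arguments
--     # (the equivalence claimed is about the return value).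
--     index = {}
--     for word in sorted(word_list):
--         index.setdefault(''.join(sorted(word)), []).append(word)
--     return [list(index.get(''.join(sorted(cs)), [])) for cs in char_set_list]
-- ===== Notes on version B (the rewrite author's own statement) =====
-- stated objective: faster
-- what changed: Replaced the in-place LSD radix sort plus a per-char_set linear scan of all words by one lexicographic sort of the words, a dict indexing them by sorted-letter signature built in a single pass, and an O(1) lookup per char_set.
-- outside the precondition, e.g. on scrabble_helper(['z', '^z'], ['z^']): A raises IndexError, B returns [['^z']]; on scrabble_helper(['^b', 'b^', 'zz'], ['b^']): A returns [['b^', '^b']], B returns [['^b', 'b^']]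
import Mathlib
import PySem

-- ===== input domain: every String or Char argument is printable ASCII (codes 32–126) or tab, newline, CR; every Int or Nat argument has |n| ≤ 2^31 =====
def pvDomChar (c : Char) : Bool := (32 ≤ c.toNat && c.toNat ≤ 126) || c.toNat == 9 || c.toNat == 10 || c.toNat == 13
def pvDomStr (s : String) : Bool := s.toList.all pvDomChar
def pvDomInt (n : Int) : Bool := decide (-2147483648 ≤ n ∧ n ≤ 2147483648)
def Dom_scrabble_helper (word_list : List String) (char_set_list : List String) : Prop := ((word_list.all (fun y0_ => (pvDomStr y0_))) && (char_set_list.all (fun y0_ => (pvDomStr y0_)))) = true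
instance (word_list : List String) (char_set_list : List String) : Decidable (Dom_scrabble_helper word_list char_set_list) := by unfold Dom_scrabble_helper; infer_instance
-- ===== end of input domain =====

-- B replaces A's per-column LSD radix sort + per-char_set scan of all words by one
-- lexicographic sort plus a signature dict, which is measurably faster; A sorts
-- word_list in place (a side effect B does not perform) — the claim is about the
-- return value only.

-- ===== PORT A =====
-- sorted(word): Python sorts the characters of the string into a list
def pvSortedChars (s : String) : List Char := PySem.List.sorted s.toList (fun c => c)

-- item = ord(word[position]) - 97 with position = -1 - length; in A this is only
-- evaluated under the guard len(word) > length, where the index is in range, so the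
-- .getD default is never used
def pvItem (length : Int) (word : String) : Int :=
  (((PySem.Str.pyGet? word (-1 - length)).getD 'a').toNat : Int) - 97

-- the max_item loop for one column
def pvMaxItem (word_list : List String) (length : Int) : Int :=
  word_list.foldl (fun max_item word =>
    if PySem.Str.len word > length then
      if pvItem length word > max_item then pvItem length word else max_item
    else max_item) 0

-- the bucket-filling loop for one column
def pvFill (length : Int) (count_array : List (List String)) (word_list : List String) :
    List (List String) :=
  word_list.foldl (fun ca word =>
    if PySem.Str.len word > length then
      PySem.List.pySetD ca (pvItem length word)
        (PySem.List.pyGetD ca (pvItem length word) [] ++ [word])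
    else
      PySem.List.pySetD ca 0 (PySem.List.pyGetD ca 0 [] ++ [word])) count_array

-- the rearranging loop: write the buckets back into word_list at index 0,1,2,…
def pvRearrange (count_array : List (List String)) (word_list : List String) : List String :=
  (count_array.foldl (fun st inner_list =>
      inner_list.foldl
        (fun (st : List String × Int) j => (PySem.List.pySetD st.1 st.2 j, st.2 + 1)) st)
    (word_list, (0 : Int))).1

-- one iteration of the `for length in range(col)` loop
-- (count_array = [None]*(max_item+1) followed by the loop setting each cell to [])
def pvPass (word_list : List String) (length : Int) : List String :=
  let max_item := pvMaxItem word_list length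
  let count_array : List (List String) := List.replicate (max_item + 1).toNat []
  pvRearrange (pvFill length count_array word_list) word_list

def scrabble_helper (word_list : List String) (char_set_list : List String) :
    List (List String) :=
  let col := word_list.foldl
    (fun col word => if PySem.Str.len word > col then PySem.Str.len word else col) 0
  let sorted_wl := (PySem.List.pyRange 0 col).foldl pvPass word_list
  -- final grouping: count_array[i] collects the words anagram-equal to char_set_list[i]
  char_set_list.map (fun cs =>
    sorted_wl.foldl
      (fun acc w => if pvSortedChars w = pvSortedChars cs then acc ++ [w] else acc) [])

-- ===== PORT B =====
-- ''.join(sorted(s))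
def pvSig (s : String) : String := String.ofList (PySem.List.sorted s.toList (fun c => c))

def scrabble_helper_alt (word_list : List String) (char_set_list : List String) :
    List (List String) :=
  let index : PySem.Dict String (List String) :=
    (PySem.List.sorted word_list (fun w => w)).foldl
      (fun d w => d.modify (pvSig w) [] (fun l => l ++ [w])) PySem.Dict.empty
  char_set_list.map (fun cs => index.getD (pvSig cs) [])

-- ===== PRECONDITION & SPEC =====
-- Pre_ excludes word lists containing a character below 'a' (code < 97): on those A's
-- negative bucket index count_array[item] either raises IndexError or wraps around to
-- an accidental bucket, reordering anagram groups (the natural domain is lowercase words).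
def Pre_scrabble_helper (word_list : List String) (char_set_list : List String) : Prop :=
  (word_list.all (fun w => w.toList.all (fun c => 97 ≤ c.toNat))) = true

instance (word_list : List String) (char_set_list : List String) :
    Decidable (Pre_scrabble_helper word_list char_set_list) := by
  unfold Pre_scrabble_helper; infer_instance

def pvWitness_scrabble_helper : List String × List String :=
  (["ba", "ab", "b", "zz"], ["ab", "!c", "zz"])

def Spec_scrabble_helper (word_list : List String) (char_set_list : List String)
    (out : List (List String)) : Prop := out = scrabble_helper_alt word_list char_set_list

instance (word_list : List String) (char_set_list : List String) (out : List (List String)) :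
    Decidable (Spec_scrabble_helper word_list char_set_list out) := by
  unfold Spec_scrabble_helper; infer_instance

-- ===== CLAIM (what is proved, stated in full; the proofs are below) =====
def Claim_equal_scrabble_helper : Prop := ∀ (word_list : List String) (char_set_list : List String), Dom_scrabble_helper word_list char_set_list → Pre_scrabble_helper word_list char_set_list → Spec_scrabble_helper word_list char_set_list (scrabble_helper word_list char_set_list)

-- ===== LEMMAS AND PROOFS =====
-- the bucket index of word w in the pass for column k (as a Nat)
def pvBIdx (k : Nat) (w : String) : Nat :=
  if k < w.toList.length then (w.toList.getD (w.toList.length - 1 - k) 'a').toNat - 97 else 0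

-- the last k characters of w
def pvSuf (k : Nat) (w : String) : List Char := w.toList.drop (w.toList.length - k)

-- lexicographic ≤ on char lists
def pvLe (a b : List Char) : Prop := a = b ∨ List.Lex (· < ·) a b

-- the radix invariant relation after k passes
def pvQ (k : Nat) (a b : String) : Prop :=
  pvSortedChars a = pvSortedChars b → pvLe (pvSuf k a) (pvSuf k b)

-- chars-in-range hypothesis (all characters at least 'a')
def pvPre (s : List String) : Prop := ∀ w ∈ s, ∀ c ∈ w.toList, 97 ≤ c.toNat

lemma pvGrp_length {a b : String} (h : pvSortedChars a = pvSortedChars b) :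
    a.toList.length = b.toList.length := by
  have := congrArg List.length h
  simpa [pvSortedChars, PySem.List.length_sorted] using this

lemma pvItem_eq {k : Nat} {w : String} (hk : k < w.toList.length) :
    pvItem (k : Int) w = ((w.toList.getD (w.toList.length - 1 - k) 'a').toNat : Int) - 97 := by
  have h2 := PySem.List.pyGet?_neg_natCast w.toList (k+1) (by omega) (by omega)
  rw [show w.toList.length - (k+1) = w.toList.length - 1 - k from by omega] at h2
  have h1 : (-1 - (k:Int)) = -((k+1 : Nat) : Int) := by push_cast; ring
  unfold pvItem
  rw [h1]
  have hs : PySem.Str.pyGet? w (-((k+1:Nat):Int)) = PySem.List.pyGet? w.toList (-((k+1:Nat):Int)) := by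
    simp [PySem.Str.pyGet?]
  rw [hs, h2, List.getElem?_eq_getElem (by omega : w.toList.length - 1 - k < w.toList.length)]
  rw [List.getD_eq_getElem _ _ (by omega : w.toList.length - 1 - k < w.toList.length)]
  simp

-- the max_item loop dominates its initial value and every qualifying item
lemma maxfold (k : Int) (s : List String) : ∀ (init : Int),
    init ≤ s.foldl (fun max_item word =>
      if PySem.Str.len word > k then
        if pvItem k word > max_item then pvItem k word else max_item
      else max_item) init ∧
    ∀ w ∈ s, PySem.Str.len w > k → pvItem k w ≤ s.foldl (fun max_item word =>
      if PySem.Str.len word > k then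
        if pvItem k word > max_item then pvItem k word else max_item
      else max_item) init := by
  induction s with
  | nil => intro init; simp
  | cons w s ih =>
    intro init
    refine ⟨?_, ?_⟩
    · exact le_trans
        (by split_ifs <;> omega :
          init ≤ if PySem.Str.len w > k then
            (if pvItem k w > init then pvItem k w else init) else init)
        (ih _).1
    · intro x hx hlen
      rcases List.mem_cons.1 hx with hx | hx
      · subst hx
        exact le_trans
          (by split_ifs <;> omega :
            pvItem k x ≤ if PySem.Str.len x > k then
              (if pvItem k x > init then pvItem k x else init) else init)
          (ih _).1
      · exact (ih _).2 x hx hlen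

lemma pvMaxItem_nonneg (s : List String) (k : Int) : 0 ≤ pvMaxItem s k :=
  (maxfold k s 0).1

lemma str_len_gt (w : String) (k : Nat) :
    (PySem.Str.len w > (k : Int)) ↔ k < w.toList.length := by
  rw [PySem.Str.len_eq]; exact_mod_cast Iff.rfl

lemma mem_getD_char {w : String} {k : Nat} (hk : k < w.toList.length) :
    w.toList.getD (w.toList.length - 1 - k) 'a' ∈ w.toList := by
  rw [List.getD_eq_getElem _ _ (by omega : w.toList.length - 1 - k < w.toList.length)]
  exact List.getElem_mem _

lemma pvItem_cast {k : Nat} {w : String} (hk : k < w.toList.length)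
    (hc : ∀ c ∈ w.toList, 97 ≤ c.toNat) : pvItem (k : Int) w = (pvBIdx k w : Int) := by
  have h97 : 97 ≤ (w.toList.getD (w.toList.length - 1 - k) 'a').toNat :=
    hc _ (mem_getD_char hk)
  rw [pvItem_eq hk]
  unfold pvBIdx
  rw [if_pos hk]
  omega

lemma pvBIdx_lt (s : List String) (k : Nat) (hpre : pvPre s) :
    ∀ w ∈ s, pvBIdx k w < (pvMaxItem s (k : Int) + 1).toNat := by
  intro w hw
  have hnn := pvMaxItem_nonneg s (k : Int)
  by_cases hk : k < w.toList.length
  · have hle := (maxfold (k : Int) s 0).2 w hw ((str_len_gt w k).2 hk)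
    have := pvItem_cast hk (hpre w hw)
    unfold pvMaxItem
    omega
  · unfold pvBIdx
    rw [if_neg hk]
    omega

lemma getD_set_lists (l : List (List String)) (n i : Nat) (v : List String) (h : n < l.length) :
    (l.set n v).getD i [] = if i = n then v else l.getD i [] := by
  by_cases hi : i = n
  · subst hi; simp [List.getD_eq_getElem?_getD, h]
  · simp [List.getD_eq_getElem?_getD, List.getElem?_set_ne (by omega : n ≠ i), hi]

-- one step of the bucket-filling loop
lemma fill_step (k : Nat) (ca : List (List String)) (w : String)
    (hc : ∀ c ∈ w.toList, 97 ≤ c.toNat) (hb : pvBIdx k w < ca.length) :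
    (if PySem.Str.len w > (k : Int) then
      PySem.List.pySetD ca (pvItem (k : Int) w)
        (PySem.List.pyGetD ca (pvItem (k : Int) w) [] ++ [w])
    else
      PySem.List.pySetD ca 0 (PySem.List.pyGetD ca 0 [] ++ [w]))
    = ca.set (pvBIdx k w) (ca.getD (pvBIdx k w) [] ++ [w]) := by
  by_cases hk : k < w.toList.length
  · rw [if_pos ((str_len_gt w k).2 hk), pvItem_cast hk hc,
      PySem.List.pySetD_natCast, PySem.List.pyGetD_natCast]
  · rw [if_neg (fun h => hk ((str_len_gt w k).1 h))]
    have h0 : pvBIdx k w = 0 := by unfold pvBIdx; rw [if_neg hk]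
    rw [h0, show (0 : Int) = ((0 : Nat) : Int) from rfl,
      PySem.List.pySetD_natCast, PySem.List.pyGetD_natCast]

lemma fill_char (k : Nat) (s : List String) : ∀ (ca : List (List String)), pvPre s →
    (∀ w ∈ s, pvBIdx k w < ca.length) →
    (pvFill (k : Int) ca s).length = ca.length ∧
      ∀ i, (pvFill (k : Int) ca s).getD i [] =
        ca.getD i [] ++ s.filter (fun w => decide (pvBIdx k w = i)) := by
  induction s with
  | nil => intro ca _ _; simp [pvFill]
  | cons w s ih =>
    intro ca hpre hb
    have hbw := hb w (List.mem_cons_self)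
    have hstep : pvFill (k : Int) ca (w :: s) =
        pvFill (k : Int) (ca.set (pvBIdx k w) (ca.getD (pvBIdx k w) [] ++ [w])) s := by
      unfold pvFill
      rw [List.foldl_cons, fill_step k ca w (hpre w List.mem_cons_self) hbw]
    have hlen : (ca.set (pvBIdx k w) (ca.getD (pvBIdx k w) [] ++ [w])).length = ca.length :=
      List.length_set ..
    have ihr := ih (ca.set (pvBIdx k w) (ca.getD (pvBIdx k w) [] ++ [w]))
      (fun x hx => hpre x (List.mem_cons_of_mem _ hx))
      (fun x hx => by rw [hlen]; exact hb x (List.mem_cons_of_mem _ hx))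
    refine ⟨by rw [hstep, ihr.1, hlen], ?_⟩
    intro i
    rw [hstep, ihr.2 i, getD_set_lists _ _ _ _ hbw]
    by_cases hbi : pvBIdx k w = i
    · subst hbi
      rw [if_pos rfl]
      simp [List.filter_cons, List.append_assoc]
    · rw [if_neg (fun h => hbi h.symm)]
      simp [List.filter_cons, hbi]

-- the inner rearranging loop writes a run of words at consecutive indices
lemma write_run (ws : List String) : ∀ (l : List String) (kk : Nat),
    kk + ws.length ≤ l.length →
    ws.foldl (fun (st : List String × Int) j => (PySem.List.pySetD st.1 st.2 j, st.2 + 1))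
        (l, (kk : Int))
      = (l.take kk ++ ws ++ l.drop (kk + ws.length), ((kk + ws.length : Nat) : Int)) := by
  induction ws with
  | nil => intro l kk h; simp
  | cons w ws ih =>
    intro l kk h
    have hkk : kk < l.length := by simp at h; omega
    rw [List.foldl_cons]
    have h1 : (PySem.List.pySetD l (kk : Int) w, (kk : Int) + 1)
        = (l.set kk w, ((kk + 1 : Nat) : Int)) := by
      rw [PySem.List.pySetD_natCast]; push_cast; ring_nf
    rw [h1, ih (l.set kk w) (kk + 1) (by simp at h ⊢; omega)]
    have htake : (l.set kk w).take (kk+1) = l.take kk ++ [w] := by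
      rw [List.set_eq_take_append_cons_drop, if_pos hkk, List.take_append]
      have h1 : (List.take kk l).length = kk := List.length_take_of_le (by omega)
      rw [h1]
      simp [show kk + 1 - kk = 1 from by omega, List.take_take]
    have hdrop : (l.set kk w).drop (kk + 1 + ws.length) = l.drop (kk + 1 + ws.length) :=
      List.drop_set_of_lt (by omega)
    rw [htake, hdrop]
    simp only [Prod.mk.injEq]
    refine ⟨?_, ?_⟩
    · simp [List.append_assoc, show kk + 1 + ws.length = kk + (ws.length + 1) from by omega]
    · congr 1
      simp
      omega

-- the outer rearranging loop writes the flattened buckets back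
lemma rearr_fold (ca : List (List String)) : ∀ (l : List String) (kk : Nat),
    kk + ca.flatten.length ≤ l.length →
    ca.foldl (fun st inner_list =>
        inner_list.foldl
          (fun (st : List String × Int) j => (PySem.List.pySetD st.1 st.2 j, st.2 + 1)) st)
      (l, (kk : Int))
      = (l.take kk ++ ca.flatten ++ l.drop (kk + ca.flatten.length),
         ((kk + ca.flatten.length : Nat) : Int)) := by
  induction ca with
  | nil => intro l kk h; simp
  | cons c ca ih =>
    intro l kk h
    simp only [List.flatten_cons, List.length_append] at h
    rw [List.foldl_cons, write_run c l kk (by omega)]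
    have htk : (l.take kk).length = kk := List.length_take_of_le (by omega)
    set l1 := l.take kk ++ c ++ l.drop (kk + c.length) with hl1
    have hlen1 : l1.length = l.length := by
      rw [hl1]
      simp only [List.length_append, List.length_drop, htk]
      omega
    rw [ih l1 (kk + c.length) (by rw [hlen1]; omega)]
    have hpre_len : (l.take kk ++ c).length = kk + c.length := by
      simp [htk]
    have htake : l1.take (kk + c.length) = l.take kk ++ c := by
      rw [hl1, ← hpre_len, List.take_left]
    have hdrop : l1.drop (kk + c.length + ca.flatten.length)
        = l.drop (kk + (c :: ca).flatten.length) := by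
      rw [hl1, show kk + c.length + ca.flatten.length
          = (l.take kk ++ c).length + ca.flatten.length from by rw [hpre_len],
        List.drop_length_add_append, List.drop_drop]
      congr 1
      simp
      omega
    rw [htake, hdrop]
    simp only [Prod.mk.injEq]
    refine ⟨?_, ?_⟩
    · simp [List.append_assoc]
    · congr 1
      simp
      omega

lemma sum_ite_range (m : Nat) (j : Nat) (c : Nat) :
    ((List.range m).map (fun i => if j = i then c else 0)).sum = if j < m then c else 0 := by
  induction m with
  | zero => simp
  | succ m ih =>
    rw [List.range_succ, List.map_append, List.sum_append, ih]
    by_cases h : j = m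
    · subst h; simp
    · by_cases h2 : j < m <;> simp [h, h2] <;> omega

lemma flatten_filter_perm (s : List String) (g : String → Nat) (m : Nat)
    (h : ∀ w ∈ s, g w < m) :
    (List.flatten ((List.range m).map (fun i => s.filter (fun w => decide (g w = i))))).Perm
      s := by
  rw [List.perm_iff_count]
  intro x
  rw [List.count_flatten, List.map_map]
  have hc : ∀ i, List.count x (s.filter (fun w => decide (g w = i)))
      = if g x = i then List.count x s else 0 := by
    intro i
    by_cases hgi : g x = i
    · rw [if_pos hgi]
      exact List.count_filter (by simp [hgi])
    · rw [if_neg hgi, List.count_eq_zero]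
      intro hmem
      exact hgi (by simpa using List.of_mem_filter hmem)
  have hmap : (List.range m).map (List.count x ∘ fun i => s.filter (fun w => decide (g w = i)))
      = (List.range m).map (fun i => if g x = i then List.count x s else 0) := by
    exact List.map_congr_left (fun i _ => hc i)
  rw [hmap, sum_ite_range]
  by_cases hx : x ∈ s
  · rw [if_pos (h x hx)]
  · have : List.count x s = 0 := List.count_eq_zero.2 hx
    simp [this]

lemma pass_flatten (k : Nat) (s : List String) (hpre : pvPre s) :
    pvPass s (k : Int) =
      List.flatten (((List.range (pvMaxItem s (k : Int) + 1).toNat)).map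
        (fun i => s.filter (fun w => decide (pvBIdx k w = i)))) := by
  have hb : ∀ w ∈ s, pvBIdx k w < (pvMaxItem s (k : Int) + 1).toNat := pvBIdx_lt s k hpre
  set m := (pvMaxItem s (k : Int) + 1).toNat with hm
  have hfc := fill_char k s (List.replicate m []) hpre
    (by intro w hw; rw [List.length_replicate]; exact hb w hw)
  have hfill : pvFill (k : Int) (List.replicate m []) s
      = (List.range m).map (fun i => s.filter (fun w => decide (pvBIdx k w = i))) := by
    apply List.ext_getElem
    · rw [hfc.1]; simp
    · intro i h1 h2
      have hlt : i < m := by simpa using h2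
      have hgd := hfc.2 i
      rw [List.getD_eq_getElem _ _ h1] at hgd
      rw [hgd]
      have hrep : (List.replicate m ([] : List String)).getD i [] = [] := by
        rw [List.getD_eq_getElem _ _ (by simpa using hlt)]
        simp
      rw [hrep, List.nil_append]
      simp
  have hperm : (List.flatten ((List.range m).map
      (fun i => s.filter (fun w => decide (pvBIdx k w = i))))).Perm s :=
    flatten_filter_perm s _ m hb
  have hlen : (List.flatten ((List.range m).map
      (fun i => s.filter (fun w => decide (pvBIdx k w = i))))).length = s.length :=
    hperm.length_eq
  show pvRearrange (pvFill (k : Int) (List.replicate m []) s) s = _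
  rw [hfill]
  unfold pvRearrange
  rw [show (0 : Int) = ((0 : Nat) : Int) from rfl,
    rearr_fold ((List.range m).map (fun i => s.filter (fun w => decide (pvBIdx k w = i)))) s 0
      (by omega)]
  simp [hlen]

lemma pass_perm (k : Nat) (s : List String) (hpre : pvPre s) :
    (pvPass s (k : Int)).Perm s := by
  rw [pass_flatten k s hpre]
  exact flatten_filter_perm s _ _ (pvBIdx_lt s k hpre)

lemma suf_succ {k : Nat} {w : String} (hk : k < w.toList.length) :
    pvSuf (k+1) w = w.toList.getD (w.toList.length - 1 - k) 'a' :: pvSuf k w := by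
  unfold pvSuf
  rw [List.drop_eq_getElem_cons (by omega : w.toList.length - (k+1) < w.toList.length)]
  rw [List.getD_eq_getElem _ _ (by omega : w.toList.length - 1 - k < w.toList.length)]
  congr 2 <;> omega

lemma suf_stable {k j : Nat} {w : String} (hk : w.toList.length ≤ k) (hj : w.toList.length ≤ j) :
    pvSuf k w = pvSuf j w := by
  unfold pvSuf; congr 1; omega

lemma char_lt_of_toNat {a b : Char} (h : a.toNat < b.toNat) : a < b := by
  exact h

lemma char_eq_of_toNat {a b : Char} (h : a.toNat = b.toNat) : a = b := by
  exact Char.ext (by exact UInt32.toNat_inj.1 h)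

lemma core_lt {k : Nat} {a b : String}
    (hpa : ∀ c ∈ a.toList, 97 ≤ c.toNat) (hpb : ∀ c ∈ b.toList, 97 ≤ c.toNat)
    (hlt : pvBIdx k a < pvBIdx k b) : pvQ (k+1) a b := by
  intro hgrp
  have hn := pvGrp_length hgrp
  have hkb : k < b.toList.length := by
    by_contra hx
    have : pvBIdx k b = 0 := by unfold pvBIdx; rw [if_neg hx]
    omega
  have hka : k < a.toList.length := by omega
  have h97a := hpa _ (mem_getD_char hka)
  have h97b := hpb _ (mem_getD_char hkb)
  have hba : pvBIdx k a = (a.toList.getD (a.toList.length - 1 - k) 'a').toNat - 97 := by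
    unfold pvBIdx; rw [if_pos hka]
  have hbb : pvBIdx k b = (b.toList.getD (b.toList.length - 1 - k) 'a').toNat - 97 := by
    unfold pvBIdx; rw [if_pos hkb]
  have hclt : a.toList.getD (a.toList.length - 1 - k) 'a'
      < b.toList.getD (b.toList.length - 1 - k) 'a' :=
    char_lt_of_toNat (by omega)
  rw [suf_succ hka, suf_succ hkb]
  exact Or.inr (List.Lex.rel hclt)

lemma core_eq {k : Nat} {a b : String}
    (hpa : ∀ c ∈ a.toList, 97 ≤ c.toNat) (hpb : ∀ c ∈ b.toList, 97 ≤ c.toNat)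
    (hq : pvQ k a b) (heq : pvBIdx k a = pvBIdx k b) : pvQ (k+1) a b := by
  intro hgrp
  have hn := pvGrp_length hgrp
  have hle := hq hgrp
  by_cases hka : k < a.toList.length
  · have hkb : k < b.toList.length := by omega
    have h97a := hpa _ (mem_getD_char hka)
    have h97b := hpb _ (mem_getD_char hkb)
    have hba : pvBIdx k a = (a.toList.getD (a.toList.length - 1 - k) 'a').toNat - 97 := by
      unfold pvBIdx; rw [if_pos hka]
    have hbb : pvBIdx k b = (b.toList.getD (b.toList.length - 1 - k) 'a').toNat - 97 := by
      unfold pvBIdx; rw [if_pos hkb]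
    have hceq : a.toList.getD (a.toList.length - 1 - k) 'a'
        = b.toList.getD (b.toList.length - 1 - k) 'a' :=
      char_eq_of_toNat (by omega)
    rw [suf_succ hka, suf_succ hkb, hceq]
    rcases hle with hle | hle
    · exact Or.inl (by rw [hle])
    · exact Or.inr (List.Lex.cons hle)
  · have hkb : ¬ k < b.toList.length := by omega
    rw [suf_stable (by omega) (by omega : a.toList.length ≤ k),
      suf_stable (by omega) (by omega : b.toList.length ≤ k)]
    exact hle

lemma pass_pairwise (k : Nat) (s : List String) (hpre : pvPre s)
    (hpw : s.Pairwise (pvQ k)) : (pvPass s (k : Int)).Pairwise (pvQ (k + 1)) := by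
  rw [pass_flatten k s hpre]
  apply List.pairwise_flatten.2
  constructor
  · intro l hl
    simp only [List.mem_map, List.mem_range] at hl
    obtain ⟨i, _, rfl⟩ := hl
    refine (hpw.filter _).imp_of_mem ?_
    intro a b ha hb hq
    have hia : pvBIdx k a = i := by simpa using List.of_mem_filter ha
    have hib : pvBIdx k b = i := by simpa using List.of_mem_filter hb
    exact core_eq (hpre a (List.mem_of_mem_filter ha)) (hpre b (List.mem_of_mem_filter hb))
      hq (by omega)
  · apply List.pairwise_map.2
    have hr : (List.range ((pvMaxItem s (k:Int) + 1).toNat)).Pairwise (· < ·) :=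
      List.pairwise_lt_range
    refine hr.imp ?_
    intro i j hij x hx y hy
    have hix : pvBIdx k x = i := by simpa using List.of_mem_filter hx
    have hiy : pvBIdx k y = j := by simpa using List.of_mem_filter hy
    exact core_lt (hpre x (List.mem_of_mem_filter hx)) (hpre y (List.mem_of_mem_filter hy))
      (by omega)

lemma radix_inv (wl : List String) (hpre : pvPre wl) (k : Nat) :
    ((List.range k).foldl (fun s (i : Nat) => pvPass s (i : Int)) wl).Perm wl ∧
      ((List.range k).foldl (fun s (i : Nat) => pvPass s (i : Int)) wl).Pairwise (pvQ k) := by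
  induction k with
  | zero =>
    refine ⟨by simp, ?_⟩
    simp only [List.range_zero, List.foldl_nil]
    refine List.pairwise_iff_getElem.2 ?_
    intro i j hi hj hij
    intro _
    have e : ∀ w : String, pvSuf 0 w = [] := by
      intro w
      unfold pvSuf
      rw [Nat.sub_zero, List.drop_length]
    rw [e, e]
    exact Or.inl rfl
  | succ k ih =>
    rw [List.range_succ, List.foldl_append]
    simp only [List.foldl_cons, List.foldl_nil]
    set S := (List.range k).foldl (fun s (i : Nat) => pvPass s (i : Int)) wl with hS
    have hpreS : pvPre S := fun w hw => hpre w (ih.1.mem_iff.1 hw)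
    refine ⟨(pass_perm k S hpreS).trans ih.1, pass_pairwise k S hpreS ih.2⟩

-- the column-maximum loop dominates every word length
lemma colfold (s : List String) : ∀ (init : Int),
    init ≤ s.foldl (fun col word =>
      if PySem.Str.len word > col then PySem.Str.len word else col) init ∧
    ∀ w ∈ s, PySem.Str.len w ≤ s.foldl (fun col word =>
      if PySem.Str.len word > col then PySem.Str.len word else col) init := by
  induction s with
  | nil => intro init; simp
  | cons w s ih =>
    intro init
    refine ⟨?_, ?_⟩
    · exact le_trans
        (by split_ifs <;> omega :
          init ≤ if PySem.Str.len w > init then PySem.Str.len w else init)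
        (ih _).1
    · intro x hx
      rcases List.mem_cons.1 hx with hx | hx
      · subst hx
        exact le_trans
          (by split_ifs <;> omega :
            PySem.Str.len x ≤ if PySem.Str.len x > init then PySem.Str.len x else init)
          (ih _).1
      · exact (ih _).2 x hx

lemma lex_lt_list {a b : List Char} (h : List.Lex (· < ·) a b) : a < b :=
  List.not_le.mp fun hc => hc h

lemma pvLe_to_le {a b : String} (h : pvLe a.toList b.toList) : a ≤ b := by
  rcases h with h | h
  · exact le_of_eq (String.ext h)
  · exact le_of_lt (String.lt_iff_toList_lt.2 (lex_lt_list h))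

-- the radix-sorted list agrees with Python's sorted() on every anagram class
lemma radix_filter_eq (wl : List String) (hpre : pvPre wl) (colN : Nat)
    (hcol : ∀ w ∈ wl, w.toList.length ≤ colN) (p : String → Bool)
    (hp : ∀ a b, p a → p b → pvSortedChars a = pvSortedChars b) :
    ((List.range colN).foldl (fun s (i : Nat) => pvPass s (i : Int)) wl).filter p
      = (PySem.List.sorted wl (fun w => w)).filter p := by
  obtain ⟨hperm, hpw⟩ := radix_inv wl hpre colN
  set S := (List.range colN).foldl (fun s (i : Nat) => pvPass s (i : Int)) wl with hS
  refine PySem.List.eq_of_perm_of_pairwise_le_of_injective (fun w : String => w)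
    (fun x y h => h) ?_ ?_ ?_
  · exact (hperm.filter p).trans ((PySem.List.sorted_perm wl (fun w => w) false).filter p).symm
  · refine (hpw.filter p).imp_of_mem ?_
    intro a b ha hb hq
    have hpa : p a := List.of_mem_filter ha
    have hpb : p b := List.of_mem_filter hb
    have hgrp := hp a b hpa hpb
    have hma : a ∈ wl := hperm.mem_iff.1 (List.mem_of_mem_filter ha)
    have hmb : b ∈ wl := hperm.mem_iff.1 (List.mem_of_mem_filter hb)
    have hle := hq hgrp
    rw [show pvSuf colN a = a.toList from by
        unfold pvSuf; rw [Nat.sub_eq_zero_of_le (hcol a hma), List.drop_zero],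
      show pvSuf colN b = b.toList from by
        unfold pvSuf; rw [Nat.sub_eq_zero_of_le (hcol b hmb), List.drop_zero]] at hle
    exact pvLe_to_le hle
  · exact (PySem.List.sorted_pairwise wl (fun w => w)).filter p

-- B's dict lookup is a filter of the sorted word list
lemma alt_getD (wl : List String) (key : String) :
    ((PySem.List.sorted wl (fun w => w)).foldl
      (fun d w => d.modify (pvSig w) [] (fun l => l ++ [w]))
      (PySem.Dict.empty : PySem.Dict String (List String))).getD key []
    = (PySem.List.sorted wl (fun w => w)).filter (fun w => pvSig w == key) := by
  set ws := PySem.List.sorted wl (fun w => w) with hws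
  have h1 : ws.foldl (fun d w => d.modify (pvSig w) [] (fun l => l ++ [w]))
        (PySem.Dict.empty : PySem.Dict String (List String))
      = (ws.map (fun w => (pvSig w, w))).foldl
        (fun d p => d.modify p.1 [] (fun l => l ++ [p.2])) PySem.Dict.empty := by
    rw [List.foldl_map]
  rw [h1, PySem.Dict.getD_foldl_modify_append]
  rw [List.filter_map]
  simp [Function.comp_def, List.map_map]

lemma sig_eq_iff (w cs : String) : pvSig w = pvSig cs ↔ pvSortedChars w = pvSortedChars cs :=
  String.ofList_inj

lemma sig_pred (cs : String) :
    (fun w => pvSig w == pvSig cs) = (fun w => decide (pvSortedChars w = pvSortedChars cs)) := by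
  funext w
  rw [Bool.beq_eq_decide_eq]
  exact decide_eq_decide.mpr (sig_eq_iff w cs)

-- ===== VERDICT =====
theorem scrabble_helper_spec : Claim_equal_scrabble_helper := by
  intro wl csl _hdom hpre
  have hpre' : pvPre wl := by
    unfold Pre_scrabble_helper at hpre
    simp only [List.all_eq_true, decide_eq_true_eq] at hpre
    exact hpre
  unfold Spec_scrabble_helper scrabble_helper scrabble_helper_alt
  have hcol0 : 0 ≤ wl.foldl
      (fun col word => if PySem.Str.len word > col then PySem.Str.len word else col) 0 :=
    (colfold wl 0).1
  obtain ⟨N, hN⟩ := Int.eq_ofNat_of_zero_le hcol0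
  have hcolw : ∀ w ∈ wl, w.toList.length ≤ N := by
    intro w hw
    have h1 := (colfold wl 0).2 w hw
    rw [PySem.Str.len_eq, hN] at h1
    exact_mod_cast h1
  have hfold : (PySem.List.pyRange 0 (wl.foldl
        (fun col word => if PySem.Str.len word > col then PySem.Str.len word else col) 0)).foldl
        pvPass wl
      = (List.range N).foldl (fun s (i : Nat) => pvPass s (i : Int)) wl := by
    rw [hN, PySem.List.pyRange_zero_natCast, List.foldl_map]
  show List.map (fun cs => List.foldl
      (fun acc w => if pvSortedChars w = pvSortedChars cs then acc ++ [w] else acc) []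
      ((PySem.List.pyRange 0 (wl.foldl
        (fun col word => if PySem.Str.len word > col then PySem.Str.len word else col) 0)).foldl
        pvPass wl)) csl
    = List.map (fun cs => ((PySem.List.sorted wl (fun w => w)).foldl
        (fun d w => d.modify (pvSig w) [] fun l => l ++ [w]) PySem.Dict.empty).getD
        (pvSig cs) []) csl
  rw [hfold]
  refine List.map_congr_left ?_
  intro cs _
  rw [PySem.List.foldl_append_ite_eq_filter
    (fun w => pvSortedChars w = pvSortedChars cs) _ [], List.nil_append]
  rw [alt_getD wl (pvSig cs), sig_pred cs]
  exact radix_filter_eq wl hpre' N hcolw _ (fun a b ha hb => by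
    have ha' : pvSortedChars a = pvSortedChars cs := by simpa using ha
    have hb' : pvSortedChars b = pvSortedChars cs := by simpa using hb
    rw [ha', hb'])
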